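-- pv_equiv track=rewrite | github.com/reeceshuttle/poker-bot | final_bot/helpers.py | StraightsCheck
-- ===== SOURCE A (Python) =====
-- def StraightsCheck(cards):
--     ans = {0:0,1:0,2:0,3:0,4:0,5:0}
--     stuff = {}
--     ranks = 'AKQJT98765432'
--     for rank in ranks:
--         stuff[rank] = 0
--     for card in cards:
--         stuff[card[0]] = 1
--     possibilities = 'A23456789TJQKA'
--     for i in range(10):
--         count = 0
--         for rank in possibilities[i:i+5]:
--             count += stuff[rank]
--         ans[count] += 1
--     return ans
-- ===== SOURCE B (Python) =====
-- def StraightsCheck(cards):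
--     ans = {0: 0, 1: 0, 2: 0, 3: 0, 4: 0, 5: 0}
--     present_ranks = {card[0] for card in cards}
--     present = [1 if r in present_ranks else 0 for r in 'A23456789TJQKA']
--     count = sum(present[0:5])
--     ans[count] += 1
--     for i in range(1, 10):
--         count += present[i + 4] - present[i - 1]
--         ans[count] += 1
--     return ans
-- ===== Notes on version B (the rewrite author's own statement) =====
-- stated objective: alternative
-- what changed: B builds a 0/1 presence array over the 14 positions of 'A23456789TJQKA' once and slides a running window sum (add the entering rank, drop the leaving one) instead of A's re-scanning 5 ranks of a per-rank dict for each of the 10 windows.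
import Mathlib
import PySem

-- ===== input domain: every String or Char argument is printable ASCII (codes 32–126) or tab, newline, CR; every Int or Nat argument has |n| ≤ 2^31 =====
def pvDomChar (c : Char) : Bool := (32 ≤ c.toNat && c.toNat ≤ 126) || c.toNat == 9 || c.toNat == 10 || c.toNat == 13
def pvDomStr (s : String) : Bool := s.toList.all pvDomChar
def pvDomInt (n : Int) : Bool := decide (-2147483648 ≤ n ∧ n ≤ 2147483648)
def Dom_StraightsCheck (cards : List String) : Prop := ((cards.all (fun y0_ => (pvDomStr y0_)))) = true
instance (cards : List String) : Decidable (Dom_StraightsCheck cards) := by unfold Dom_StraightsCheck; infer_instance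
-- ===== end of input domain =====

-- B replaces A's per-window rescan of 5 ranks by a presence bitmap and a sliding running sum (alternative decomposition; same result).

-- ===== PORT A =====
def StraightsCheck (cards : List String) : List (Int × Int) :=
  let ans : PySem.Dict Int Int := PySem.Dict.ofList [(0,0),(1,0),(2,0),(3,0),(4,0),(5,0)]
  let stuff : PySem.Dict Char Int :=
    "AKQJT98765432".toList.foldl (fun d r => d.insert r 0) PySem.Dict.empty
  let stuff := cards.foldl (fun d card =>
      match PySem.Str.pyGet? card 0 with   -- card[0]; none = IndexError on an empty card, excluded by Pre_
      | some c => d.insert c 1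
      | none => d) stuff
  let ans := (PySem.List.pyRange 0 10 1).foldl (fun a i =>
      let count := (PySem.List.slice "A23456789TJQKA".toList (some i) (some (i+5))).foldl
          (fun c r => c + stuff.getD r 0) 0
      a.insert count (a.getD count 0 + 1)) ans
  ans.items

-- ===== PORT B =====
def StraightsCheck_alt (cards : List String) : List (Int × Int) :=
  let ans : PySem.Dict Int Int := PySem.Dict.ofList [(0,0),(1,0),(2,0),(3,0),(4,0),(5,0)]
  let presentRanks : PySem.Set Char :=
    PySem.Set.ofList (cards.filterMap (fun card => PySem.Str.pyGet? card 0))   -- {card[0] for card in cards}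
  let present : List Int :=
    "A23456789TJQKA".toList.map (fun r => if PySem.Set.contains presentRanks r then 1 else 0)
  let count := (PySem.List.slice present (some 0) (some 5)).foldl (· + ·) 0
  let ans := ans.insert count (ans.getD count 0 + 1)
  let res := (PySem.List.pyRange 1 10 1).foldl (fun (s : PySem.Dict Int Int × Int) i =>
      let count := s.2 + PySem.List.pyGetD present (i+4) 0 - PySem.List.pyGetD present (i-1) 0
      (s.1.insert count (s.1.getD count 0 + 1), count)) (ans, count)
  res.1.items

-- ===== PRECONDITION & SPEC =====
-- Pre_ excludes exactly the inputs where the Python A raises: an empty-string card makes card[0] an IndexError.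
def Pre_StraightsCheck (cards : List String) : Prop := ∀ card ∈ cards, card.toList ≠ []
instance (cards : List String) : Decidable (Pre_StraightsCheck cards) := by unfold Pre_StraightsCheck; infer_instance
def pvWitness_StraightsCheck : List String := ["As", "Kd", "3h"]
def Spec_StraightsCheck (cards : List String) (out : List (Int × Int)) : Prop := out = StraightsCheck_alt cards
instance (cards : List String) (out : List (Int × Int)) : Decidable (Spec_StraightsCheck cards out) := by unfold Spec_StraightsCheck; infer_instance

-- ===== CLAIM (what is proved, stated in full; the proofs are below) =====
def Claim_equal_StraightsCheck : Prop := ∀ (cards : List String), Dom_StraightsCheck cards → Pre_StraightsCheck cards → Spec_StraightsCheck cards (StraightsCheck cards)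

-- ===== LEMMAS AND PROOFS =====

-- 1 if some card's first character is r, else 0 (the value both ports' lookups reduce to)
def pvBit (cards : List String) (r : Char) : Int :=
  if cards.any (fun c => PySem.Str.pyGet? c 0 == some r) then 1 else 0

def pvAns0 : PySem.Dict Int Int := PySem.Dict.ofList [(0,0),(1,0),(2,0),(3,0),(4,0),(5,0)]

-- A's window loop, abstracted over the 14-entry presence list
def pvCoreA (p : List Int) : PySem.Dict Int Int :=
  (PySem.List.pyRange 0 10 1).foldl (fun a i =>
      let count := (PySem.List.slice p (some i) (some (i+5))).foldl (· + ·) 0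
      a.insert count (a.getD count 0 + 1)) pvAns0

-- B's sliding-sum loop, abstracted over the same list
def pvCoreB (p : List Int) : PySem.Dict Int Int :=
  let count := (PySem.List.slice p (some 0) (some 5)).foldl (· + ·) 0
  let ans := pvAns0.insert count (pvAns0.getD count 0 + 1)
  ((PySem.List.pyRange 1 10 1).foldl (fun (s : PySem.Dict Int Int × Int) i =>
      let count := s.2 + PySem.List.pyGetD p (i+4) 0 - PySem.List.pyGetD p (i-1) 0
      (s.1.insert count (s.1.getD count 0 + 1), count)) (ans, count)).1

set_option maxHeartbeats 2000000 in
lemma pv_core14 (a b c d e f g h i j k l m n : Int) :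
    pvCoreA [a,b,c,d,e,f,g,h,i,j,k,l,m,n] = pvCoreB [a,b,c,d,e,f,g,h,i,j,k,l,m,n] := by
  simp only [pvCoreA, pvCoreB,
    show PySem.List.pyRange 0 10 1 = [0,1,2,3,4,5,6,7,8,9] from by decide,
    show PySem.List.pyRange 1 10 1 = [1,2,3,4,5,6,7,8,9] from by decide,
    List.foldl]
  simp only [show PySem.List.slice [a,b,c,d,e,f,g,h,i,j,k,l,m,n] (some 0) (some (0+5)) = [a,b,c,d,e] from rfl,
    show PySem.List.slice [a,b,c,d,e,f,g,h,i,j,k,l,m,n] (some 1) (some (1+5)) = [b,c,d,e,f] from rfl,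
    show PySem.List.slice [a,b,c,d,e,f,g,h,i,j,k,l,m,n] (some 2) (some (2+5)) = [c,d,e,f,g] from rfl,
    show PySem.List.slice [a,b,c,d,e,f,g,h,i,j,k,l,m,n] (some 3) (some (3+5)) = [d,e,f,g,h] from rfl,
    show PySem.List.slice [a,b,c,d,e,f,g,h,i,j,k,l,m,n] (some 4) (some (4+5)) = [e,f,g,h,i] from rfl,
    show PySem.List.slice [a,b,c,d,e,f,g,h,i,j,k,l,m,n] (some 5) (some (5+5)) = [f,g,h,i,j] from rfl,
    show PySem.List.slice [a,b,c,d,e,f,g,h,i,j,k,l,m,n] (some 6) (some (6+5)) = [g,h,i,j,k] from rfl,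
    show PySem.List.slice [a,b,c,d,e,f,g,h,i,j,k,l,m,n] (some 7) (some (7+5)) = [h,i,j,k,l] from rfl,
    show PySem.List.slice [a,b,c,d,e,f,g,h,i,j,k,l,m,n] (some 8) (some (8+5)) = [i,j,k,l,m] from rfl,
    show PySem.List.slice [a,b,c,d,e,f,g,h,i,j,k,l,m,n] (some 9) (some (9+5)) = [j,k,l,m,n] from rfl,
    show PySem.List.slice [a,b,c,d,e,f,g,h,i,j,k,l,m,n] (some 0) (some 5) = [a,b,c,d,e] from rfl,
    show PySem.List.pyGetD [a,b,c,d,e,f,g,h,i,j,k,l,m,n] (1+4) 0 = f from rfl,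
    show PySem.List.pyGetD [a,b,c,d,e,f,g,h,i,j,k,l,m,n] (1-1) 0 = a from rfl,
    show PySem.List.pyGetD [a,b,c,d,e,f,g,h,i,j,k,l,m,n] (2+4) 0 = g from rfl,
    show PySem.List.pyGetD [a,b,c,d,e,f,g,h,i,j,k,l,m,n] (2-1) 0 = b from rfl,
    show PySem.List.pyGetD [a,b,c,d,e,f,g,h,i,j,k,l,m,n] (3+4) 0 = h from rfl,
    show PySem.List.pyGetD [a,b,c,d,e,f,g,h,i,j,k,l,m,n] (3-1) 0 = c from rfl,
    show PySem.List.pyGetD [a,b,c,d,e,f,g,h,i,j,k,l,m,n] (4+4) 0 = i from rfl,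
    show PySem.List.pyGetD [a,b,c,d,e,f,g,h,i,j,k,l,m,n] (4-1) 0 = d from rfl,
    show PySem.List.pyGetD [a,b,c,d,e,f,g,h,i,j,k,l,m,n] (5+4) 0 = j from rfl,
    show PySem.List.pyGetD [a,b,c,d,e,f,g,h,i,j,k,l,m,n] (5-1) 0 = e from rfl,
    show PySem.List.pyGetD [a,b,c,d,e,f,g,h,i,j,k,l,m,n] (6+4) 0 = k from rfl,
    show PySem.List.pyGetD [a,b,c,d,e,f,g,h,i,j,k,l,m,n] (6-1) 0 = f from rfl,
    show PySem.List.pyGetD [a,b,c,d,e,f,g,h,i,j,k,l,m,n] (7+4) 0 = l from rfl,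
    show PySem.List.pyGetD [a,b,c,d,e,f,g,h,i,j,k,l,m,n] (7-1) 0 = g from rfl,
    show PySem.List.pyGetD [a,b,c,d,e,f,g,h,i,j,k,l,m,n] (8+4) 0 = m from rfl,
    show PySem.List.pyGetD [a,b,c,d,e,f,g,h,i,j,k,l,m,n] (8-1) 0 = h from rfl,
    show PySem.List.pyGetD [a,b,c,d,e,f,g,h,i,j,k,l,m,n] (9+4) 0 = n from rfl,
    show PySem.List.pyGetD [a,b,c,d,e,f,g,h,i,j,k,l,m,n] (9-1) 0 = i from rfl, List.foldl]
  rw [show 0+a+b+c+d+e+f-a = 0+b+c+d+e+f from by ring]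
  rw [show 0+b+c+d+e+f+g-b = 0+c+d+e+f+g from by ring]
  rw [show 0+c+d+e+f+g+h-c = 0+d+e+f+g+h from by ring]
  rw [show 0+d+e+f+g+h+i-d = 0+e+f+g+h+i from by ring]
  rw [show 0+e+f+g+h+i+j-e = 0+f+g+h+i+j from by ring]
  rw [show 0+f+g+h+i+j+k-f = 0+g+h+i+j+k from by ring]
  rw [show 0+g+h+i+j+k+l-g = 0+h+i+j+k+l from by ring]
  rw [show 0+h+i+j+k+l+m-h = 0+i+j+k+l+m from by ring]
  rw [show 0+i+j+k+l+m+n-i = 0+j+k+l+m+n from by ring]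


lemma pv_stuff0 (r : Char) :
    (("AKQJT98765432".toList.foldl (fun d r => d.insert r 0) PySem.Dict.empty : PySem.Dict Char Int)).getD r 0 = 0 := by
  simp [show "AKQJT98765432".toList = ['A','K','Q','J','T','9','8','7','6','5','4','3','2'] from rfl,
    List.foldl, PySem.Dict.getD_insert, PySem.Dict.getD_empty]

lemma pv_lookupA (cards : List String) :
    ∀ (d : PySem.Dict Char Int) (r : Char),
      (cards.foldl (fun d card =>
        match PySem.Str.pyGet? card 0 with
        | some c => d.insert c 1
        | none => d) d).getD r 0
      = if cards.any (fun c => PySem.Str.pyGet? c 0 == some r) then 1 else d.getD r 0 := by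
  induction cards with
  | nil => intro d r; simp
  | cons card rest ih =>
    intro d r
    simp only [List.foldl_cons]
    rw [ih]
    rcases Option.eq_none_or_eq_some (PySem.Str.pyGet? card 0) with hc | ⟨c, hc⟩
    · have hf : (match PySem.Str.pyGet? card 0 with
          | some c => d.insert c 1
          | none => d) = d := by rw [hc]
      have hany : (card :: rest).any (fun c => PySem.Str.pyGet? c 0 == some r)
          = rest.any (fun c => PySem.Str.pyGet? c 0 == some r) := by
        rw [List.any_cons, hc]; rfl
      rw [hf, hany]
    · have hf : (match PySem.Str.pyGet? card 0 with
          | some c' => d.insert c' 1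
          | none => d) = d.insert c 1 := by rw [hc]
      have hany : (card :: rest).any (fun c => PySem.Str.pyGet? c 0 == some r)
          = ((c == r) || rest.any (fun c => PySem.Str.pyGet? c 0 == some r)) := by
        rw [List.any_cons, hc]; rfl
      rw [hf, hany]
      by_cases hrc : r = c
      · subst hrc
        simp
      · have hcr : (c == r) = false := by simp [Ne.symm hrc]
        rw [hcr, Bool.false_or, PySem.Dict.getD_insert, if_neg hrc]

lemma pv_setB (cards : List String) (r : Char) :
    PySem.Set.contains (PySem.Set.ofList (cards.filterMap (fun card => PySem.Str.pyGet? card 0))) r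
      = cards.any (fun c => PySem.Str.pyGet? c 0 == some r) := by
  rw [Bool.eq_iff_iff]
  simp [PySem.Set.mem_ofList, List.mem_filterMap, List.any_eq_true]

lemma pv_countw (v : Char → Int) (l : List Char) (i : Int) (hi : 0 ≤ i) :
    (PySem.List.slice l (some i) (some (i+5))).foldl (fun c r => c + v r) 0
      = (PySem.List.slice (l.map v) (some i) (some (i+5))).foldl (· + ·) 0 := by
  rw [PySem.List.slice_toNat l hi (by omega), PySem.List.slice_toNat (l.map v) hi (by omega),
    ← List.map_drop, ← List.map_take, List.foldl_map]

lemma pv_lookup_bit (cards : List String) (r : Char) :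
    (cards.foldl (fun d card =>
        match PySem.Str.pyGet? card 0 with
        | some c => d.insert c 1
        | none => d)
      (("AKQJT98765432".toList.foldl (fun d r => d.insert r 0) PySem.Dict.empty) : PySem.Dict Char Int)).getD r 0
      = pvBit cards r := by
  rw [pv_lookupA, pv_stuff0, pvBit]

lemma pv_bridgeA (cards : List String) :
    StraightsCheck cards = (pvCoreA ("A23456789TJQKA".toList.map (pvBit cards))).items := by
  simp only [StraightsCheck, pvCoreA]
  refine congrArg PySem.Dict.items ?_
  apply PySem.List.foldl_congr_mem
  intro a i hi
  have h0 : (0:Int) ≤ i := ((PySem.List.mem_pyRange_one).mp hi).1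
  simp only [pv_lookup_bit]
  rw [pv_countw (pvBit cards) _ i h0]

lemma pv_bridgeB (cards : List String) :
    StraightsCheck_alt cards = (pvCoreB ("A23456789TJQKA".toList.map (pvBit cards))).items := by
  simp only [StraightsCheck_alt, pvCoreB, pvAns0, pv_setB]
  rfl

-- ===== VERDICT (by name: the statement is the Claim_ definition above) =====
theorem StraightsCheck_spec : Claim_equal_StraightsCheck := by
  intro cards _ _
  unfold Spec_StraightsCheck
  rw [pv_bridgeA, pv_bridgeB,
    show ("A23456789TJQKA".toList.map (pvBit cards))
      = [pvBit cards 'A', pvBit cards '2', pvBit cards '3', pvBit cards '4', pvBit cards '5',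
         pvBit cards '6', pvBit cards '7', pvBit cards '8', pvBit cards '9', pvBit cards 'T',
         pvBit cards 'J', pvBit cards 'Q', pvBit cards 'K', pvBit cards 'A'] from rfl,
    pv_core14]
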